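-- pv_equiv track=rewrite | github.com/kaiokot/tests | worldpay/num2word.py | setNumber
-- ===== SOURCE A (Python) =====
-- def setNumber(number):
--     strNum = ""
--     if number > 19:
--         for num in iter(str(number)):
--             if strNum == "":
--                 strNum = num
--             else:
--                 strNum += "0"
--     else:
--         strNum = number
--
--     return int(strNum)
-- ===== SOURCE B (Python) =====
-- def setNumber(number):
--     # Arithmetic instead of string-building: find the largest power of ten
--     # not exceeding the number, then truncate to the leading digit.
--     if number > 19:
--         p = 1
--         while p * 10 <= number:
--             p *= 10
--         return number // p * p
--     return int(number)
-- ===== Notes on version B (the rewrite author's own statement) =====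
-- stated objective: simpler
-- what changed: Replaces A's digit-by-digit string accumulation (build 'd00...0' from str(number) and re-parse it with int) by pure arithmetic: find the largest power of ten p <= number by repeated multiplication and return number // p * p.
import Mathlib
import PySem

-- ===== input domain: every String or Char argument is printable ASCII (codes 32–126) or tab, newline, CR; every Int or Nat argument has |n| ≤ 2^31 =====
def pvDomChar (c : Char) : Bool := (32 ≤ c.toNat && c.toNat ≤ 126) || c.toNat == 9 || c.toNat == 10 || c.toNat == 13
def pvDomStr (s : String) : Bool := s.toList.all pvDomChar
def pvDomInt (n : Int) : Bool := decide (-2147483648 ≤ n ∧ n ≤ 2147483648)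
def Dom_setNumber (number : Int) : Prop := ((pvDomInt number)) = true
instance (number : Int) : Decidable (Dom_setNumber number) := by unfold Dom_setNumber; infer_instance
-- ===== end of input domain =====

-- B replaces A's string-building round-trip (leading digit of str(number) followed by zeros,
-- re-parsed with int) by pure integer arithmetic on the largest power of ten; same values, simpler.


-- ===== PORT A =====
-- the loop body of `for num in iter(str(number))`
def setNumberStep (s : List Char) (c : Char) : List Char :=
  if s = [] then [c] else s ++ ['0']

-- Port of A; strings are carried as List Char (PySem.Int.toChars = str(number),
-- PySem.Int.ofChars? = int(strNum)).  The `.getD 0` default is unreachable: for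
-- number > 19 the built string is a digit followed by zeros, which int() accepts.
def setNumber (number : Int) : Int :=
  if number > 19 then
    let strNum := (PySem.Int.toChars number).foldl setNumberStep []
    (PySem.Int.ofChars? strNum).getD 0
  else number

-- ===== PORT B =====
-- `p = 1; while p * 10 <= number: p *= 10` (the proof argument 0 < p only serves termination)
def findPow (n p : Nat) (hp : 0 < p) : Nat :=
  if p * 10 ≤ n then findPow n (p * 10) (by omega) else p
termination_by n - p
decreasing_by omega

def setNumber_alt (number : Int) : Int :=
  if number > 19 then
    let p : Nat := findPow number.toNat 1 (by omega)
    PySem.Int.floordiv number (p : Int) * (p : Int)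
  else number

-- ===== PRECONDITION & SPEC =====
def Spec_setNumber (number : Int) (out : Int) : Prop := out = setNumber_alt number
instance (number : Int) (out : Int) : Decidable (Spec_setNumber number out) := by unfold Spec_setNumber; infer_instance

-- ===== CLAIM (what is proved, stated in full; the proofs are below) =====
def Claim_equal_setNumber : Prop := ∀ (number : Int), Dom_setNumber number → Spec_setNumber number (setNumber number)

-- ===== LEMMAS AND PROOFS =====

-- A's loop: once the accumulator is nonempty, every further character appends one '0'.
lemma foldl_setNumberStep (t : List Char) : ∀ s : List Char, s ≠ [] →
    t.foldl setNumberStep s = s ++ List.replicate t.length '0' := by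
  induction t with
  | nil => intro s _; simp
  | cons c t ih =>
    intro s hs
    have hstep : setNumberStep s c = s ++ ['0'] := by simp [setNumberStep, hs]
    have : (s ++ ['0']) ≠ [] := by simp
    simp only [List.foldl_cons, hstep, ih _ this, List.length_cons]
    simp [List.replicate_succ, List.append_assoc]

-- Nat.toDigitsCore in base 10, with enough fuel, is the reversed digit list.
lemma toDigitsCore_eq_digits : ∀ (fuel n : Nat) (acc : List Char), 0 < n → n ≤ fuel →
    Nat.toDigitsCore 10 fuel n acc = ((Nat.digits 10 n).map Nat.digitChar).reverse ++ acc := by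
  intro fuel
  induction fuel with
  | zero => intro n acc hn hle; omega
  | succ fuel ih =>
    intro n acc hn hle
    rw [Nat.toDigitsCore]
    have hdig : Nat.digits 10 n = n % 10 :: Nat.digits 10 (n / 10) :=
      Nat.digits_def' (by norm_num) hn
    by_cases h : n / 10 = 0
    · simp [h, hdig]
    · have h1 : 0 < n / 10 := Nat.pos_of_ne_zero h
      have h2 : n / 10 ≤ fuel := by
        have := Nat.div_lt_self hn (by norm_num : 1 < 10)
        omega
      simp only [h, if_false]
      rw [ih (n / 10) _ h1 h2, hdig]
      simp

lemma toDigits_eq_digits (n : Nat) (hn : 0 < n) :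
    Nat.toDigits 10 n = ((Nat.digits 10 n).map Nat.digitChar).reverse := by
  have := toDigitsCore_eq_digits (n + 1) n [] hn (by omega)
  simpa [Nat.toDigits] using this

-- The last (most significant) digit is n / 10 ^ log₁₀ n.
lemma digits_getLast_eq (n : Nat) (hn : 0 < n) (h : Nat.digits 10 n ≠ []) :
    (Nat.digits 10 n).getLast h = n / 10 ^ Nat.log 10 n := by
  induction n using Nat.strong_induction_on with
  | _ n ih =>
    by_cases hlt : n < 10
    · have hdig : Nat.digits 10 n = [n] := by
        rw [Nat.digits_def' (by norm_num : 1 < 10) hn, Nat.div_eq_of_lt hlt,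
          Nat.mod_eq_of_lt hlt]
        simp
      have hlog : Nat.log 10 n = 0 := Nat.log_eq_zero_iff.mpr (Or.inl hlt)
      simp [hdig, hlog]
    · push_neg at hlt
      have h1 : 0 < n / 10 := Nat.div_pos hlt (by norm_num)
      have h2 : n / 10 < n := Nat.div_lt_self hn (by norm_num)
      have h3 : Nat.digits 10 (n / 10) ≠ [] := Nat.digits_ne_nil_iff_ne_zero.mpr (by omega)
      rw [Nat.digits_getLast n (by norm_num) h h3, ih _ h2 h1 h3]
      have hlog : Nat.log 10 (n / 10) = Nat.log 10 n - 1 := Nat.log_div_base 10 n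
      have hpos : 0 < Nat.log 10 n := Nat.log_pos (by norm_num) hlt
      rw [hlog, Nat.div_div_eq_div_mul]
      congr 1
      rw [← pow_succ']
      congr 1
      omega

-- B's loop computes the largest power of ten below n.
lemma findPow_eq (n : Nat) (hn : 0 < n) : ∀ (m j : Nat) (hj : 10 ^ j ≤ n), m = Nat.log 10 n - j →
    findPow n (10 ^ j) (by positivity) = 10 ^ Nat.log 10 n := by
  intro m
  induction m with
  | zero =>
    intro j hj hm
    have hjle : j ≤ Nat.log 10 n := (Nat.le_log_iff_pow_le (by norm_num) (by omega)).mpr hj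
    have hjeq : j = Nat.log 10 n := by omega
    have hcond : ¬ (10 ^ j * 10 ≤ n) := by
      intro hcon
      rw [← pow_succ] at hcon
      have := (Nat.le_log_iff_pow_le (by norm_num) (by omega)).mpr hcon
      omega
    rw [findPow, if_neg hcond, hjeq]
  | succ m ih =>
    intro j hj hm
    by_cases h : 10 ^ j * 10 ≤ n
    · rw [findPow, if_pos h]
      have h' : 10 ^ (j + 1) ≤ n := by rwa [pow_succ]
      exact ih (j + 1) h' (by
        have := (Nat.le_log_iff_pow_le (by norm_num : (1:Nat) < 10) (by omega : n ≠ 0)).mpr h'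
        omega)
    · rw [findPow, if_neg h]
      have h' : n < 10 ^ (j + 1) := by rw [pow_succ]; omega
      rw [Nat.log_eq_of_pow_le_of_lt_pow hj h']

-- int() of a digit followed by k zeros, for the finitely many shapes reachable here.
lemma ofChars_digit_zeros : ∀ d < 10, ∀ k < 10,
    PySem.Int.ofChars? (Nat.digitChar d :: List.replicate k '0') = some ((d * 10 ^ k : Nat) : Int) := by
  decide

-- ===== VERDICT (by name: the statement is the Claim_ definition above) =====
theorem setNumber_spec : Claim_equal_setNumber := by
  unfold Claim_equal_setNumber
  intro number hdom
  unfold Spec_setNumber setNumber setNumber_alt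
  by_cases hgt : number > 19
  · simp only [hgt, if_true]
    have hb : number ≤ 2147483648 := by
      simp only [Dom_setNumber, pvDomInt, decide_eq_true_eq] at hdom; exact hdom.2
    set n : Nat := number.toNat with hn
    have hnum : number = (n : Int) := by omega
    have hn19 : 19 < n := by omega
    have hnpos : 0 < n := by omega
    have hnb : n ≤ 2147483648 := by omega
    set k : Nat := Nat.log 10 n with hk
    have hk9 : k < 10 := Nat.log_lt_of_lt_pow (by omega)
      (by have h10 : (10:Nat) ^ 10 = 10000000000 := by norm_num
          rw [h10]; omega)
    have hkle : 10 ^ k ≤ n := Nat.pow_log_le_self 10 (by omega)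
    have hklt : n < 10 ^ (k + 1) := Nat.lt_pow_succ_log_self (by norm_num) n
    set d : Nat := n / 10 ^ k with hd
    have hd10 : d < 10 := by
      have : n < 10 * 10 ^ k := by rw [mul_comm, ← pow_succ]; exact hklt
      rw [hd]
      exact Nat.div_lt_of_lt_mul (by rwa [mul_comm] at this)
    -- A side: characterise the built string
    have htoc : PySem.Int.toChars number = ((Nat.digits 10 n).map Nat.digitChar).reverse := by
      rw [hnum, PySem.Int.toChars]
      have : ¬ ((n : Int) < 0) := by omega
      simp [this, toDigits_eq_digits n hnpos]
    have hdnil : Nat.digits 10 n ≠ [] := Nat.digits_ne_nil_iff_ne_zero.mpr (by omega)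
    have hlen : (Nat.digits 10 n).length = k + 1 := Nat.digits_len 10 n (by norm_num) (by omega)
    have hne : ((Nat.digits 10 n).map Nat.digitChar).reverse ≠ [] := by simp [hdnil]
    obtain ⟨c, t, hct⟩ := List.exists_cons_of_ne_nil hne
    have hc : c = Nat.digitChar d := by
      have h1 : ((Nat.digits 10 n).map Nat.digitChar).reverse.head hne = c := by
        simp [hct]
      rw [← h1, ← List.getLast_eq_head_reverse, List.getLast_map,
        digits_getLast_eq n hnpos hdnil, hd]
      simp [hdnil]
    have ht : t.length = k := by
      have h2 := congrArg List.length hct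
      simp only [List.length_reverse, List.length_map, hlen, List.length_cons] at h2
      omega
    have hfold : (PySem.Int.toChars number).foldl setNumberStep [] =
        Nat.digitChar d :: List.replicate k '0' := by
      rw [htoc, hct, List.foldl_cons]
      have hstep0 : setNumberStep [] c = [c] := by simp [setNumberStep]
      rw [hstep0, foldl_setNumberStep t [c] (by simp), ht, hc]
      simp
    have hfp : findPow number.toNat 1 (by omega) = 10 ^ k := by
      have := findPow_eq n hnpos (Nat.log 10 n - 0) 0 (by simpa using hnpos) rfl
      simpa [← hn, ← hk] using this
    rw [hfold, ofChars_digit_zeros d hd10 k hk9, Option.getD_some, hfp, hnum,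
      PySem.Int.floordiv_natCast n (10 ^ k), hd]
    push_cast
    ring
  · simp [hgt]
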